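-- pv_equiv track=rewrite | github.com/LuizRojas/URIchallenge | Strings/1234.py | string_dancante
-- ===== SOURCE A (Python) =====
-- def string_dancante(string) -> str:
--     string = string.lower()
--     contador = 0
--     caracteres = []
--     for i in string:
--         if i == ' ':
--             caracteres.append(i)
--             continue
--         else:
--             if (contador % 2 == 0):
--                 caracteres.append(i.upper())
--             elif (contador % 2 != 0):
--                 caracteres.append(i.lower())
--         contador += 1
--     nova_string = ''.join(caracteres)
--     return nova_string
-- ===== SOURCE B (Python) =====
-- def string_dancante(string) -> str:
--     s = string.lower()
--     dancing = [c.upper() if i % 2 == 0 else c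
--                for i, c in enumerate(c for c in s if c != ' ')]
--     it = iter(dancing)
--     return ''.join(c if c == ' ' else next(it) for c in s)
-- ===== Notes on version B (the rewrite author's own statement) =====
-- stated objective: alternative
-- what changed: A interleaves counting and case-flipping in one stateful loop with a counter skipped on spaces; B first precomputes the alternating-case sequence over the space-filtered characters via enumerate, then re-inserts spaces in a second pass consuming that sequence with an iterator.
import Mathlib
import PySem

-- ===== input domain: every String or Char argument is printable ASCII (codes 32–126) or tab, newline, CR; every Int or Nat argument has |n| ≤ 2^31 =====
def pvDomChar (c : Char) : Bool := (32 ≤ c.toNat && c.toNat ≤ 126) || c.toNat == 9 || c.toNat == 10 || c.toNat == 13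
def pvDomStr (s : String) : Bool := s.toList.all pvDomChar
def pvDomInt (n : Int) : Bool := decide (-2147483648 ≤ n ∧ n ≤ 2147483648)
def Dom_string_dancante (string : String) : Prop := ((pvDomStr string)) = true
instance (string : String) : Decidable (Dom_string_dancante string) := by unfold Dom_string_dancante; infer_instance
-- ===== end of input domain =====

-- B restructures A: A's single loop with a space-skipping counter becomes a precomputed
-- alternating-case map over the space-filtered characters plus a second pass re-inserting spaces.

-- ===== PORT A =====
-- A's loop: contador counts non-space chars; spaces are appended via 'continue'.
def aLoop : List Char → Nat → List Char
  | [], _ => []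
  | i :: rest, contador =>
    if i = ' ' then i :: aLoop rest contador
    else (if contador % 2 = 0 then PySem.Chars.upperChar i
          else PySem.Chars.lowerChar i) :: aLoop rest (contador + 1)

def string_dancante (string : String) : String :=
  String.mk (aLoop (PySem.Str.lower string).toList 0)

-- ===== PORT B =====
-- the comprehension body: even index → upper, odd → unchanged (the chars are already lower)
def bDanceChar (p : Int × Char) : Char :=
  if PySem.Int.mod p.1 2 = 0 then PySem.Chars.upperChar p.2 else p.2

-- the join over the generator: spaces pass through, other positions consume next(it)
def bMerge : List Char → List Char → List Char
  | [], _ => []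
  | c :: rest, d =>
    if c = ' ' then c :: bMerge rest d
    else match d with
      | [] => []            -- unreachable: dancing has one char per non-space char of s
      | x :: ds => x :: bMerge rest ds

def string_dancante_alt (string : String) : String :=
  let s := (PySem.Str.lower string).toList
  let dancing := (PySem.List.enumerate (s.filter (fun c => c ≠ ' '))).map bDanceChar
  String.mk (bMerge s dancing)

-- ===== PRECONDITION & SPEC =====
def Spec_string_dancante (string : String) (out : String) : Prop := out = string_dancante_alt string
instance (string : String) (out : String) : Decidable (Spec_string_dancante string out) := by unfold Spec_string_dancante; infer_instance

-- ===== CLAIM (what is proved, stated in full; the proofs are below) =====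
def Claim_equal_string_dancante : Prop := ∀ (string : String), Dom_string_dancante string → Spec_string_dancante string (string_dancante string)

-- ===== LEMMAS AND PROOFS =====

theorem lowerChar_idem (c : Char) :
    PySem.Chars.lowerChar (PySem.Chars.lowerChar c) = PySem.Chars.lowerChar c := by
  simp only [PySem.Chars.lowerChar, PySem.Chars.isupper]
  split_ifs with h1 h2
  · exfalso
    simp only [Bool.and_eq_true, decide_eq_true_eq] at h1 h2
    have h65 : 65 ≤ c.toNat := h1.1
    have h90 : c.toNat ≤ 90 := h1.2
    have hv : (Char.ofNat (c.toNat + 32)).toNat = c.toNat + 32 := by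
      rw [Char.toNat_ofNat, if_pos]; exact Or.inl (by omega)
    have h2' : (Char.ofNat (c.toNat + 32)).toNat ≤ 90 := h2.2
    omega
  · rfl
  · rfl

-- B's two passes reproduce A's loop, for any starting counter n over an already-lowered list
theorem merge_eq (xs : List Char) (n : Nat)
    (hl : ∀ c ∈ xs, PySem.Chars.lowerChar c = c) :
    bMerge xs ((PySem.List.enumerate (xs.filter (fun c => c ≠ ' ')) (n : Int)).map bDanceChar)
      = aLoop xs n := by
  induction xs generalizing n with
  | nil => rfl
  | cons c rest ih =>
    by_cases hc : c = ' '
    · subst hc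
      have ih' := ih n (fun x hx => hl x (List.mem_cons_of_mem _ hx))
      simp only [ne_eq, decide_not] at ih'
      simp only [List.filter_cons, ne_eq, decide_not, decide_true, Bool.not_true,
        Bool.false_eq_true, if_false, bMerge, aLoop, if_true, ih']
    · have hmod : PySem.Int.mod (n : Int) 2 = ((n % 2 : Nat) : Int) := PySem.Int.mod_natCast n 2
      have ih' := ih (n + 1) (fun x hx => hl x (List.mem_cons_of_mem _ hx))
      simp only [ne_eq, decide_not] at ih'
      have hcast : ((n : Int)) + 1 = ((n + 1 : Nat) : Int) := by push_cast; ring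
      simp only [List.filter_cons, ne_eq, decide_not, hc, decide_false, Bool.not_false,
        if_true, PySem.List.enumerate_cons, List.map_cons, bMerge, aLoop,
        bDanceChar, hmod, hcast, ih']
      by_cases hp : n % 2 = 0
      · simp [hp]
      · have h2 : ¬ ((2 : Int) ∣ (n : Int)) := by omega
        simp [hp, h2, hl c (List.mem_cons_self)]

-- ===== VERDICT (by name: the statement is the Claim_ definition above) =====
theorem string_dancante_spec : Claim_equal_string_dancante := by
  intro s _
  unfold Spec_string_dancante string_dancante string_dancante_alt
  have hl : ∀ c ∈ (PySem.Str.lower s).toList, PySem.Chars.lowerChar c = c := by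
    intro c hc
    rw [PySem.Str.toList_lower] at hc
    rcases List.mem_map.mp hc with ⟨d, _, rfl⟩
    exact lowerChar_idem d
  have h := merge_eq (PySem.Str.lower s).toList 0 hl
  simp only [Nat.cast_zero] at h
  exact (congrArg String.mk h).symm
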